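-- pv_equiv track=rewrite | github.com/OlegVukadinov/SoftUni-Fundamentals-with-Python-September-2023 | Fundamentals with Python - Sept 2023/12 Lists Basics - More Exercise/6_list_manipulator.py | find_min_even_odd
-- ===== SOURCE A (Python) =====
-- def find_min_even_odd(lst, command):
--     is_even = command == "min even"
--     filter_func = lambda x: x % 2 == 0 if is_even else x % 2 != 0
--     min_element = None
--     min_index = -1
--     for i in range(len(lst)):
--         if filter_func(lst[i]):
--             if min_element is None or lst[i] <= min_element:
--                 min_element = lst[i]
--                 min_index = i
--     return min_index
-- ===== SOURCE B (Python) =====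
-- def find_min_even_odd(lst, command):
--     want = 0 if command == "min even" else 1
--     candidates = [x for x in lst if x % 2 == want]
--     if not candidates:
--         return -1
--     m = min(candidates)
--     return len(lst) - 1 - lst[::-1].index(m)
-- ===== Notes on version B (the rewrite author's own statement) =====
-- stated objective: alternative
-- what changed: Replaces A's single fused scan that tracks (min_element, min_index) with <=-updates by a three-phase decomposition: filter the parity-matching values, take their min, then locate the last occurrence by searching the reversed list (len-1-reversed.index(m)), which reproduces A's last-occurrence tie-breaking.
import Mathlib
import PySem

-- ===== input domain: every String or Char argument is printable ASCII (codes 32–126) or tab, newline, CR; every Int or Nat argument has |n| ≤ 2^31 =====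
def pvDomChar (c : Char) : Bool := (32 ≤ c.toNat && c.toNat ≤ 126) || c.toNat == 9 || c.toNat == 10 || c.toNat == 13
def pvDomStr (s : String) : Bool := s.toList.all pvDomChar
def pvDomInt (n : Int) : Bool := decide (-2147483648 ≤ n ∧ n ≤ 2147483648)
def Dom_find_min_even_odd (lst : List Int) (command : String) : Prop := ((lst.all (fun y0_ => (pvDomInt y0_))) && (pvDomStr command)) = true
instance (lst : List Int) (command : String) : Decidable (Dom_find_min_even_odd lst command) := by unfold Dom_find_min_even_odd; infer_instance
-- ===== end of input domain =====

-- B replaces A's fused (min_element, min_index) scan by filter → min → locate the last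
-- occurrence via the reversed list; same O(n) cost, different decomposition.

-- ===== PORT A =====
-- literal transliteration of A: one pass over range(len(lst)), state (min_element, min_index)
def find_min_even_odd (lst : List Int) (command : String) : Int :=
  let is_even := command == "min even"
  let filter_func : Int → Bool := fun x =>
    if is_even then PySem.Int.mod x 2 == 0 else PySem.Int.mod x 2 != 0
  let st := (PySem.List.pyRange 0 (lst.length : Int) 1).foldl
    (fun (s : Option Int × Int) i =>
      if filter_func (PySem.List.pyGetD lst i 0) then   -- lst[i]; i is always in range here
        match s.1 with
        | none => (some (PySem.List.pyGetD lst i 0), i)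
        | some m =>
          if PySem.List.pyGetD lst i 0 ≤ m then (some (PySem.List.pyGetD lst i 0), i) else s
      else s)
    (none, -1)
  st.2

-- ===== PORT B =====
def find_min_even_odd_alt (lst : List Int) (command : String) : Int :=
  let want : Int := if command == "min even" then 0 else 1
  let candidates := lst.filter (fun x => PySem.Int.mod x 2 == want)
  match PySem.List.min? candidates (fun y => y) with
  | none => -1
  | some m =>
    -- lst[::-1].index(m); the reverse slice is List.reverse (PySem.List.slice?_none_none_neg_one)
    match PySem.List.index? lst.reverse m with
    | some i => (lst.length : Int) - 1 - (i : Int)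
    | none => -1   -- unreachable: m ∈ lst

-- ===== PRECONDITION & SPEC =====
def Spec_find_min_even_odd (lst : List Int) (command : String) (out : Int) : Prop := out = find_min_even_odd_alt lst command
instance (lst : List Int) (command : String) (out : Int) : Decidable (Spec_find_min_even_odd lst command out) := by unfold Spec_find_min_even_odd; infer_instance

-- ===== CLAIM (what is proved, stated in full; the proofs are below) =====
def Claim_equal_find_min_even_odd : Prop := ∀ (lst : List Int) (command : String), Dom_find_min_even_odd lst command → Spec_find_min_even_odd lst command (find_min_even_odd lst command)

-- ===== LEMMAS AND PROOFS =====

-- A's loop body, over (index, value) pairs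
def pvStep (p : Int → Bool) (s : Option Int × Int) (iv : Int × Int) : Option Int × Int :=
  if p iv.2 then
    match s.1 with
    | none => (some iv.2, iv.1)
    | some m => if iv.2 ≤ m then (some iv.2, iv.1) else s
  else s

-- B's answer for predicate p, as a function
def pvB (p : Int → Bool) (xs : List Int) : Int :=
  match PySem.List.min? (xs.filter p) (fun y => y) with
  | none => -1
  | some m =>
    match PySem.List.index? xs.reverse m with
    | some i => (xs.length : Int) - 1 - (i : Int)
    | none => -1

lemma min?_append_singleton (l : List Int) (x : Int) :
    PySem.List.min? (l ++ [x]) (fun y => y) =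
    some (match PySem.List.min? l (fun y => y) with | none => x | some m => min m x) := by
  cases l with
  | nil =>
      have h0 : PySem.List.min? ([] : List Int) (fun y => y) = none :=
        (PySem.List.min?_eq_none_iff _ _).mpr rfl
      rw [List.nil_append, h0, PySem.List.min?_id_cons]
      rfl
  | cons y t =>
      rw [List.cons_append, PySem.List.min?_id_cons, PySem.List.min?_id_cons,
        List.foldl_append]
      rfl

lemma pvA_loop_eq (p : Int → Bool) (xs : List Int) :
    (PySem.List.enumerate xs 0).foldl (pvStep p) (none, -1) =
    (PySem.List.min? (xs.filter p) (fun y => y), pvB p xs) := by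
  induction xs using List.reverseRecOn with
  | nil =>
      have h0 : PySem.List.min? ([] : List Int) (fun y => y) = none :=
        (PySem.List.min?_eq_none_iff _ _).mpr rfl
      simp [PySem.List.enumerate_nil, pvB, h0]
  | append_singleton xs x ih =>
      rw [PySem.List.enumerate_append, List.foldl_append, ih,
        PySem.List.enumerate_cons, PySem.List.enumerate_nil, List.foldl_cons, List.foldl_nil]
      by_cases hp : p x
      · have hfil : (xs ++ [x]).filter p = xs.filter p ++ [x] := by
          simp [List.filter_append, hp]
        have hrev : (xs ++ [x]).reverse = x :: xs.reverse := by simp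
        cases hmin : PySem.List.min? (xs.filter p) (fun y => y) with
        | none =>
            have hmin2 : PySem.List.min? ((xs ++ [x]).filter p) (fun y => y) = some x := by
              rw [hfil, min?_append_singleton, hmin]
            have hBnew : pvB p (xs ++ [x]) = (xs.length : Int) := by
              simp only [pvB, hmin2, hrev, PySem.List.index?_cons_self,
                List.length_append, List.length_singleton]
              push_cast; ring
            rw [hmin2, hBnew]
            simp [pvStep, hp]
        | some m0 =>
            by_cases hle : x ≤ m0
            · have hmm : min m0 x = x := min_eq_right hle
              have hmin2 : PySem.List.min? ((xs ++ [x]).filter p) (fun y => y) = some x := by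
                rw [hfil, min?_append_singleton, hmin]; simp [hmm]
              have hBnew : pvB p (xs ++ [x]) = (xs.length : Int) := by
                simp only [pvB, hmin2, hrev, PySem.List.index?_cons_self,
                  List.length_append, List.length_singleton]
                push_cast; ring
              rw [hmin2, hBnew]
              simp [pvStep, hp, hle]
            · have hlt : m0 < x := lt_of_not_ge hle
              have hmm : min m0 x = m0 := min_eq_left (le_of_lt hlt)
              have hne : x ≠ m0 := ne_of_gt hlt
              have hmem : m0 ∈ xs := (List.mem_filter.mp (PySem.List.min?_mem hmin)).1
              obtain ⟨j, hj⟩ := Option.isSome_iff_exists.mp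
                ((PySem.List.index?_isSome_iff xs.reverse m0).mpr (List.mem_reverse.mpr hmem))
              have hmin2 : PySem.List.min? ((xs ++ [x]).filter p) (fun y => y) = some m0 := by
                rw [hfil, min?_append_singleton, hmin]; simp [hmm]
              have hBold : pvB p xs = (xs.length : Int) - 1 - (j : Int) := by
                simp only [pvB, hmin, hj]
              have hBnew : pvB p (xs ++ [x]) = (xs.length : Int) - 1 - (j : Int) := by
                simp only [pvB, hmin2, hrev, PySem.List.index?_cons_of_ne _ hne, hj,
                  Option.map_some, List.length_append, List.length_singleton]
                push_cast; ring
              rw [hmin2, hBold, hBnew]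
              simp [pvStep, hp, hle]
      · have hfil : (xs ++ [x]).filter p = xs.filter p := by
          simp [List.filter_append, hp]
        have hrev : (xs ++ [x]).reverse = x :: xs.reverse := by simp
        cases hmin : PySem.List.min? (xs.filter p) (fun y => y) with
        | none =>
            have hmin2 : PySem.List.min? ((xs ++ [x]).filter p) (fun y => y) = none := by
              rw [hfil, hmin]
            have hBold : pvB p xs = -1 := by simp only [pvB, hmin]
            have hBnew : pvB p (xs ++ [x]) = -1 := by simp only [pvB, hmin2]
            rw [hmin2, hBold, hBnew]
            simp [pvStep, hp]
        | some m0 =>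
            have hpm : p m0 := (List.mem_filter.mp (PySem.List.min?_mem hmin)).2
            have hne : x ≠ m0 := fun h => hp (h ▸ hpm)
            have hmem : m0 ∈ xs := (List.mem_filter.mp (PySem.List.min?_mem hmin)).1
            obtain ⟨j, hj⟩ := Option.isSome_iff_exists.mp
              ((PySem.List.index?_isSome_iff xs.reverse m0).mpr (List.mem_reverse.mpr hmem))
            have hmin2 : PySem.List.min? ((xs ++ [x]).filter p) (fun y => y) = some m0 := by
              rw [hfil, hmin]
            have hBold : pvB p xs = (xs.length : Int) - 1 - (j : Int) := by
              simp only [pvB, hmin, hj]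
            have hBnew : pvB p (xs ++ [x]) = (xs.length : Int) - 1 - (j : Int) := by
              simp only [pvB, hmin2, hrev, PySem.List.index?_cons_of_ne _ hne, hj,
                Option.map_some, List.length_append, List.length_singleton]
              push_cast; ring
            rw [hmin2, hBold, hBnew]
            simp [pvStep, hp]

lemma pred_eq (command : String) (x : Int) :
    (if command == "min even" then PySem.Int.mod x 2 == 0 else PySem.Int.mod x 2 != 0) =
    (PySem.Int.mod x 2 == (if command == "min even" then (0 : Int) else 1)) := by
  by_cases hc : (command == "min even") = true
  · rw [if_pos hc, if_pos hc]
  · rw [if_neg hc, if_neg hc]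
    rcases PySem.Int.mod_two_eq x with h | h <;> rw [h] <;> decide

-- ===== VERDICT (by name: the statement is the Claim_ definition above) =====
theorem find_min_even_odd_spec : Claim_equal_find_min_even_odd := by
  intro lst command _
  unfold Spec_find_min_even_odd find_min_even_odd find_min_even_odd_alt
  simp only [pred_eq]
  have hbridge :
      (PySem.List.pyRange 0 (lst.length : Int) 1).foldl
        (fun (s : Option Int × Int) i =>
          if (PySem.Int.mod (PySem.List.pyGetD lst i 0) 2 ==
              (if command == "min even" then (0 : Int) else 1)) then
            match s.1 with
            | none => (some (PySem.List.pyGetD lst i 0), i)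
            | some m =>
              if PySem.List.pyGetD lst i 0 ≤ m then (some (PySem.List.pyGetD lst i 0), i) else s
          else s)
        ((none : Option Int), (-1 : Int)) =
      (PySem.List.enumerate lst 0).foldl
        (pvStep (fun x => PySem.Int.mod x 2 == (if command == "min even" then (0 : Int) else 1)))
        (none, -1) := by
    rw [PySem.List.enumerate_eq_map_pyRange lst 0, List.foldl_map]
    simp [pvStep, PySem.List.len]
  rw [hbridge, pvA_loop_eq]
  rfl
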